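-- pv_equiv track=rewrite | github.com/winvu88888888-maker/tinnam888888 | test_column_forensic.py | m_5gram
-- ===== SOURCE A (Python) =====
-- from collections import Counter, defaultdict
--
-- def m_transition(h, pos):
--     trans = defaultdict(Counter)
--     for i in range(len(h)-1):
--         trans[h[i][pos]][h[i+1][pos]] += 1
--     lv = h[-1][pos]
--     if lv in trans and trans[lv]:
--         return trans[lv].most_common(1)[0][0]
--     return lv
--
-- def m_bigram(h, pos):
--     if len(h) < 3: return h[-1][pos]
--     trans = defaultdict(Counter)
--     for i in range(len(h)-2):
--         key = (h[i][pos], h[i+1][pos])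
--         trans[key][h[i+2][pos]] += 1
--     key = (h[-2][pos], h[-1][pos])
--     if key in trans and trans[key]:
--         return trans[key].most_common(1)[0][0]
--     return m_transition(h, pos)
--
-- def m_trigram(h, pos):
--     if len(h) < 4: return m_bigram(h, pos)
--     trans = defaultdict(Counter)
--     for i in range(len(h)-3):
--         key = (h[i][pos], h[i+1][pos], h[i+2][pos])
--         trans[key][h[i+3][pos]] += 1
--     key = (h[-3][pos], h[-2][pos], h[-1][pos])
--     if key in trans and trans[key]:
--         return trans[key].most_common(1)[0][0]
--     return m_bigram(h, pos)
--
-- def m_4gram(h, pos):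
--     if len(h) < 5: return m_trigram(h, pos)
--     trans = defaultdict(Counter)
--     for i in range(len(h)-4):
--         key = (h[i][pos], h[i+1][pos], h[i+2][pos], h[i+3][pos])
--         trans[key][h[i+4][pos]] += 1
--     key = (h[-4][pos], h[-3][pos], h[-2][pos], h[-1][pos])
--     if key in trans and trans[key]:
--         return trans[key].most_common(1)[0][0]
--     return m_trigram(h, pos)
--
-- def m_5gram(h, pos):
--     if len(h) < 6: return m_4gram(h, pos)
--     trans = defaultdict(Counter)
--     for i in range(len(h)-5):
--         key = tuple(h[j][pos] for j in range(i, i+5))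
--         trans[key][h[i+5][pos]] += 1
--     key = tuple(h[j][pos] for j in range(len(h)-5, len(h)))
--     if key in trans and trans[key]:
--         return trans[key].most_common(1)[0][0]
--     return m_4gram(h, pos)
-- ===== SOURCE B (Python) =====
-- from collections import Counter
--
-- def m_5gram(h, pos):
--     col = [row[pos] for row in h]
--     n = len(col)
--     for k in range(5, 0, -1):
--         if n >= k + 1:
--             target = tuple(col[n - k:])
--             counts = Counter()
--             for i in range(n - k):
--                 if tuple(col[i:i + k]) == target:
--                     counts[col[i + k]] += 1
--             if counts:
--                 return counts.most_common(1)[0][0]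
--     return col[-1]
-- ===== Notes on version B (the rewrite author's own statement) =====
-- stated objective: simpler
-- what changed: Replaces the five-function cascade of per-level defaultdict(Counter) transition tables (keyed by n-gram tuples) with one loop over levels k=5..1 that extracts the column once and does a targeted scan counting only followers of positions matching the last-k key.
-- outside the precondition, e.g. on m_5gram([[], [5]], 0): A returns 5, B raises IndexError
import Mathlib
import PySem

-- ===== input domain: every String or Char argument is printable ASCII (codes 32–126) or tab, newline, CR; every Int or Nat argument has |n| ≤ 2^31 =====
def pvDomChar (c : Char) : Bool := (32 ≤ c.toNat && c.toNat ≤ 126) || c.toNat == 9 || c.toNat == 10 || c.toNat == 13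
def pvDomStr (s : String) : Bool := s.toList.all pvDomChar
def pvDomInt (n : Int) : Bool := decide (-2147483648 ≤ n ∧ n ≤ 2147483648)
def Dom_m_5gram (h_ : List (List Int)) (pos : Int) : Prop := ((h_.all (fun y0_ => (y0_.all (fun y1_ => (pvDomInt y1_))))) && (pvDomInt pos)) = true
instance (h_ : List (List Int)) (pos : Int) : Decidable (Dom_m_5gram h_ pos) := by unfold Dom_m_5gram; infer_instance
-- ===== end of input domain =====

-- B replaces A's five-function cascade of tuple-keyed defaultdict(Counter) tables by one
-- levels loop over an extracted column with a targeted scan (objective: simpler).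

-- ===== PORT A =====
-- h[i][pos] (negative indices Python-style; total with defaults, exact under Pre_)
def pvCell (h : List (List Int)) (pos i : Int) : Int :=
  PySem.List.pyGetD (PySem.List.pyGetD h i []) pos 0

-- Counter.most_common(1)[0][0]: first item of maximal count in insertion order
-- (Python's most_common sorts stably by descending count). Exact for nonempty counters;
-- both call sites guard nonemptiness. Shared by both ports (both Pythons call most_common).
def pvMostCommon1 (c : PySem.Dict Int Int) : Int :=
  match c.items with
  | [] => 0
  | p :: rest => (rest.foldl (fun b q => if b.2 < q.2 then q else b) p).1

def m_transition (h : List (List Int)) (pos : Int) : Int :=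
  let trans := List.foldl
    (fun d i => d.modify (pvCell h pos i) PySem.Dict.empty
      (fun c => c.modify (pvCell h pos (i + 1)) 0 (· + 1)))
    PySem.Dict.empty (PySem.List.pyRange 0 (PySem.List.len h - 1) 1)
  let lv := pvCell h pos (-1)
  if trans.contains lv && !((trans.getD lv PySem.Dict.empty).items.isEmpty)
  then pvMostCommon1 (trans.getD lv PySem.Dict.empty) else lv

def m_bigram (h : List (List Int)) (pos : Int) : Int :=
  if PySem.List.len h < 3 then pvCell h pos (-1) else
  let trans := List.foldl
    (fun d i => d.modify (pvCell h pos i, pvCell h pos (i + 1)) PySem.Dict.empty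
      (fun c => c.modify (pvCell h pos (i + 2)) 0 (· + 1)))
    PySem.Dict.empty (PySem.List.pyRange 0 (PySem.List.len h - 2) 1)
  let key := (pvCell h pos (-2), pvCell h pos (-1))
  if trans.contains key && !((trans.getD key PySem.Dict.empty).items.isEmpty)
  then pvMostCommon1 (trans.getD key PySem.Dict.empty) else m_transition h pos

def m_trigram (h : List (List Int)) (pos : Int) : Int :=
  if PySem.List.len h < 4 then m_bigram h pos else
  let trans := List.foldl
    (fun d i => d.modify (pvCell h pos i, pvCell h pos (i + 1), pvCell h pos (i + 2)) PySem.Dict.empty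
      (fun c => c.modify (pvCell h pos (i + 3)) 0 (· + 1)))
    PySem.Dict.empty (PySem.List.pyRange 0 (PySem.List.len h - 3) 1)
  let key := (pvCell h pos (-3), pvCell h pos (-2), pvCell h pos (-1))
  if trans.contains key && !((trans.getD key PySem.Dict.empty).items.isEmpty)
  then pvMostCommon1 (trans.getD key PySem.Dict.empty) else m_bigram h pos

def m_4gram (h : List (List Int)) (pos : Int) : Int :=
  if PySem.List.len h < 5 then m_trigram h pos else
  let trans := List.foldl
    (fun d i => d.modify (pvCell h pos i, pvCell h pos (i + 1), pvCell h pos (i + 2), pvCell h pos (i + 3)) PySem.Dict.empty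
      (fun c => c.modify (pvCell h pos (i + 4)) 0 (· + 1)))
    PySem.Dict.empty (PySem.List.pyRange 0 (PySem.List.len h - 4) 1)
  let key := (pvCell h pos (-4), pvCell h pos (-3), pvCell h pos (-2), pvCell h pos (-1))
  if trans.contains key && !((trans.getD key PySem.Dict.empty).items.isEmpty)
  then pvMostCommon1 (trans.getD key PySem.Dict.empty) else m_trigram h pos

def m_5gram (h_ : List (List Int)) (pos : Int) : Int :=
  if PySem.List.len h_ < 6 then m_4gram h_ pos else
  let trans := List.foldl
    (fun d i => d.modify (pvCell h_ pos i, pvCell h_ pos (i + 1), pvCell h_ pos (i + 2), pvCell h_ pos (i + 3), pvCell h_ pos (i + 4)) PySem.Dict.empty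
      (fun c => c.modify (pvCell h_ pos (i + 5)) 0 (· + 1)))
    PySem.Dict.empty (PySem.List.pyRange 0 (PySem.List.len h_ - 5) 1)
  let key := (pvCell h_ pos (PySem.List.len h_ - 5), pvCell h_ pos (PySem.List.len h_ - 4),
              pvCell h_ pos (PySem.List.len h_ - 3), pvCell h_ pos (PySem.List.len h_ - 2),
              pvCell h_ pos (PySem.List.len h_ - 1))
  if trans.contains key && !((trans.getD key PySem.Dict.empty).items.isEmpty)
  then pvMostCommon1 (trans.getD key PySem.Dict.empty) else m_4gram h_ pos

-- ===== PORT B =====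
-- col = [row[pos] for row in h]
def pvColumn (h : List (List Int)) (pos : Int) : List Int :=
  h.map (fun row => PySem.List.pyGetD row pos 0)

-- level-k targeted scan: Counter of followers col[i+k] at positions i where col[i:i+k] == col[n-k:]
def pvLevelCounts (col : List Int) (k : Nat) : PySem.Dict Int Int :=
  let target := PySem.List.slice col (some ((col.length : Int) - k)) none
  List.foldl
    (fun c i =>
      if PySem.List.slice col (some i) (some (i + k)) = target
      then c.modify (PySem.List.pyGetD col (i + k) 0) 0 (· + 1) else c)
    PySem.Dict.empty (PySem.List.pyRange 0 ((col.length : Int) - k) 1)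

-- for k in range(5, 0, -1): if n >= k+1: … ; base: col[-1]
def pvGo (col : List Int) : Nat → Int
  | 0 => PySem.List.pyGetD col (-1) 0
  | Nat.succ k' =>
    if ((k' : Int) + 1) + 1 ≤ (col.length : Int) then
      let c := pvLevelCounts col (k' + 1)
      if c.items.isEmpty then pvGo col k' else pvMostCommon1 c
    else pvGo col k'

def m_5gram_alt (h_ : List (List Int)) (pos : Int) : Int :=
  pvGo (pvColumn h_ pos) 5

-- ===== PRECONDITION & SPEC =====
-- Pre_ excludes empty h_ (h[-1] raises IndexError in A) and any pos out of range for some row: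
-- there A raises too except for ragged inputs with len(h_) ≤ 2 where A only reads the last row
-- and still returns while B's column extraction raises IndexError (cited in claim.json).
def Pre_m_5gram (h_ : List (List Int)) (pos : Int) : Prop :=
  h_ ≠ [] ∧ ∀ row ∈ h_, PySem.Raise.InRange row.length pos
instance (h_ : List (List Int)) (pos : Int) : Decidable (Pre_m_5gram h_ pos) := by
  unfold Pre_m_5gram; infer_instance
def pvWitness_m_5gram : List (List Int) × Int := ([[1], [2], [1], [3]], 0)

def Spec_m_5gram (h_ : List (List Int)) (pos : Int) (out : Int) : Prop := out = m_5gram_alt h_ pos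
instance (h_ : List (List Int)) (pos : Int) (out : Int) : Decidable (Spec_m_5gram h_ pos out) := by unfold Spec_m_5gram; infer_instance

-- ===== CLAIM (what is proved, stated in full; the proofs are below) =====
def Claim_equal_m_5gram : Prop := ∀ (h_ : List (List Int)) (pos : Int), Dom_m_5gram h_ pos → Pre_m_5gram h_ pos → Spec_m_5gram h_ pos (m_5gram h_ pos)

-- ===== LEMMAS AND PROOFS =====

lemma pvGetD_nil (pos : Int) : PySem.List.pyGetD ([] : List Int) pos 0 = 0 := by
  simp [PySem.List.pyGetD, PySem.List.pyGet?]

lemma pvCell_eq (h : List (List Int)) (pos i : Int) :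
    pvCell h pos i = PySem.List.pyGetD (pvColumn h pos) i 0 := by
  unfold pvCell pvColumn
  have := PySem.List.pyGetD_map (fun r => PySem.List.pyGetD r pos 0) h i []
  simpa [pvGetD_nil] using this.symm

lemma pvColumn_length (h : List (List Int)) (pos : Int) :
    (pvColumn h pos).length = h.length := by simp [pvColumn]

lemma pvGroupfold_getD {K : Type} [BEq K] [LawfulBEq K] [DecidableEq K]
    (key : Int → K) (fol : Int → Int) (q : K) :
    ∀ (l : List Int) (d : PySem.Dict K (PySem.Dict Int Int)),
    (l.foldl (fun d i => d.modify (key i) PySem.Dict.empty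
        (fun c => c.modify (fol i) 0 (· + 1))) d).getD q PySem.Dict.empty
    = (l.filter (fun i => key i == q)).foldl
        (fun c i => c.modify (fol i) 0 (· + 1)) (d.getD q PySem.Dict.empty)
  | [], d => rfl
  | i :: l, d => by
    simp only [List.foldl_cons, List.filter_cons]
    rw [pvGroupfold_getD key fol q l _]
    by_cases hq : key i = q
    · rw [PySem.Dict.getD_modify]
      simp [hq]
    · rw [PySem.Dict.getD_modify]
      simp [hq, Ne.symm hq]

lemma pvGroupfold_contains {K : Type} [BEq K] [LawfulBEq K] [DecidableEq K]
    (key : Int → K) (fol : Int → Int) (q : K) :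
    ∀ (l : List Int) (d : PySem.Dict K (PySem.Dict Int Int)),
    (l.foldl (fun d i => d.modify (key i) PySem.Dict.empty
        (fun c => c.modify (fol i) 0 (· + 1))) d).contains q
    = (d.contains q || l.any (fun i => key i == q))
  | [], d => by simp
  | i :: l, d => by
    simp only [List.foldl_cons, List.any_cons]
    rw [pvGroupfold_contains key fol q l _]
    rw [PySem.Dict.contains_modify]
    by_cases hq : key i = q
    · simp [hq]
    · have h1 : (q == key i) = false := by simp [Ne.symm hq]
      have h2 : (key i == q) = false := by simp [hq]
      simp [h1, h2]

lemma pvModify_items_ne_nil (c : PySem.Dict Int Int) (x : Int) (f : Int → Int) :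
    (c.modify x 0 f).items ≠ [] := by
  intro hnil
  have hc := PySem.Dict.contains_modify c x x 0 f
  rcases hm : c.modify x 0 f with ⟨its⟩
  rw [hm] at hc hnil
  subst hnil
  simp at hc

lemma pvCountfold_ne (fol : Int → Int) :
    ∀ (l : List Int) (d : PySem.Dict Int Int), d.items ≠ [] →
    ((l.foldl (fun c i => c.modify (fol i) 0 (· + 1)) d).items ≠ [])
  | [], _, hd => hd
  | i :: l, d, hd => by
    simp only [List.foldl_cons]
    exact pvCountfold_ne fol l _ (pvModify_items_ne_nil d (fol i) _)

lemma pvCountfold_items_eq_nil_iff (fol : Int → Int) (l : List Int) :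
    ((l.foldl (fun c i => c.modify (fol i) 0 (· + 1)) (PySem.Dict.empty : PySem.Dict Int Int)).items = []) ↔ l = [] := by
  constructor
  · intro hl
    cases l with
    | nil => rfl
    | cons i t =>
      exfalso
      simp only [List.foldl_cons] at hl
      exact pvCountfold_ne fol t ((PySem.Dict.empty : PySem.Dict Int Int).modify (fol i) 0 (· + 1))
        (pvModify_items_ne_nil _ _ _) hl
  · rintro rfl; rfl

lemma pvLevel_eq {K : Type} [BEq K] [LawfulBEq K] [DecidableEq K]
    (col : List Int) (k : Nat) (key : Int → K) (fb : Int)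
    (hkey : ∀ i ∈ PySem.List.pyRange 0 ((col.length : Int) - k) 1,
      (key i == key ((col.length : Int) - k))
        = decide (PySem.List.slice col (some i) (some (i + k))
            = PySem.List.slice col (some ((col.length : Int) - k)) none)) :
    (let trans := List.foldl
        (fun d i => d.modify (key i) PySem.Dict.empty
          (fun c => c.modify (PySem.List.pyGetD col (i + k) 0) 0 (· + 1)))
        PySem.Dict.empty (PySem.List.pyRange 0 ((col.length : Int) - k) 1)
     let q := key ((col.length : Int) - k)
     if trans.contains q && !((trans.getD q PySem.Dict.empty).items.isEmpty)
     then pvMostCommon1 (trans.getD q PySem.Dict.empty) else fb)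
    = (if (pvLevelCounts col k).items.isEmpty then fb
       else pvMostCommon1 (pvLevelCounts col k)) := by
  simp only []
  set R := PySem.List.pyRange 0 ((col.length : Int) - k) 1 with hR
  set q := key ((col.length : Int) - k) with hq
  have hgetD := pvGroupfold_getD key (fun i => PySem.List.pyGetD col (i + k) 0) q R PySem.Dict.empty
  have hcont := pvGroupfold_contains key (fun i => PySem.List.pyGetD col (i + k) 0) q R PySem.Dict.empty
  have hcounts : pvLevelCounts col k
      = (R.filter (fun i => decide (PySem.List.slice col (some i) (some (i + k))
            = PySem.List.slice col (some ((col.length : Int) - k)) none))).foldl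
          (fun c i => c.modify (PySem.List.pyGetD col (i + k) 0) 0 (· + 1)) PySem.Dict.empty := by
    unfold pvLevelCounts
    rw [PySem.List.foldl_ite_eq_foldl_filter]
  have hfil : R.filter (fun i => key i == q)
      = R.filter (fun i => decide (PySem.List.slice col (some i) (some (i + k))
            = PySem.List.slice col (some ((col.length : Int) - k)) none)) :=
    List.filter_congr hkey
  rw [PySem.Dict.getD_empty, hfil, ← hcounts] at hgetD
  rw [PySem.Dict.contains_empty, Bool.false_or] at hcont
  by_cases hnil : (R.filter (fun i => decide (PySem.List.slice col (some i) (some (i + k))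
            = PySem.List.slice col (some ((col.length : Int) - k)) none))) = []
  · have hempty : (pvLevelCounts col k).items = [] := by
      rw [hcounts, hnil]; rfl
    have hcfalse : (R.any fun i => key i == q) = false := by
      rw [List.any_eq_false]
      intro x hx
      have := List.filter_eq_nil_iff.mp (hfil ▸ hnil) x hx
      simpa using this
    rw [hcfalse] at hcont
    simp [hcont, hempty]
  · have hne : (pvLevelCounts col k).items ≠ [] := by
      rw [hcounts]
      exact fun hh => hnil ((pvCountfold_items_eq_nil_iff _ _).mp hh)
    have hctrue : (R.any fun i => key i == q) = true := by
      rw [List.any_eq_true]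
      rcases List.exists_mem_of_ne_nil _ hnil with ⟨x, hx⟩
      have hx' : x ∈ R.filter (fun i => key i == q) := hfil ▸ hx
      exact ⟨x, List.mem_of_mem_filter hx',
        List.of_mem_filter (p := fun i => key i == q) hx'⟩
    rw [hctrue] at hcont
    have hiE : (pvLevelCounts col k).items.isEmpty = false := by
      simp [hne]
    simp [hcont, hgetD, hiE]

lemma pvGi_nat (col : List Int) (m : Nat) (hm : m < col.length) :
    PySem.List.pyGetD col (m : Int) 0 = col[m] := by
  rw [PySem.List.pyGetD_natCast]
  exact List.getD_eq_getElem col 0 hm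

lemma pvGi_congr (col : List Int) {x y : Int} (h : x = y) :
    PySem.List.pyGetD col x 0 = PySem.List.pyGetD col y 0 := by rw [h]

lemma pvGi_neg (col : List Int) (m : Nat) (h0 : 0 < m) (hm : m ≤ col.length) :
    PySem.List.pyGetD col (-(m : Int)) 0
      = PySem.List.pyGetD col ((col.length : Int) - m) 0 := by
  rw [PySem.List.pyGetD_neg_natCast col m 0 h0 hm,
      show ((col.length : Int) - m) = ((col.length - m : Nat) : Int) by
        push_cast [Nat.cast_sub hm]; ring,
      pvGi_nat col (col.length - m) (by omega)]

lemma pvSeg_eq_iff (col : List Int) (a k : Nat) (hak : a + k ≤ col.length) :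
    ((col.drop a).take k = col.drop (col.length - k))
    ↔ (∀ j : Nat, j < k →
        PySem.List.pyGetD col ((a : Int) + j) 0
          = PySem.List.pyGetD col (((col.length - k : Nat) : Int) + j) 0) := by
  have hg1 : ∀ (j : Nat) (hj : j < k), ((col.drop a).take k)[j]'(by
      simp [List.length_take, List.length_drop]; omega) = col[a + j]'(by omega) := by
    intro j hj
    rw [List.getElem_take, List.getElem_drop]
  have hg2 : ∀ (j : Nat) (hj : j < k), (col.drop (col.length - k))[j]'(by
      simp [List.length_drop]; omega) = col[col.length - k + j]'(by omega) := by
    intro j hj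
    rw [List.getElem_drop]
  constructor
  · intro heq j hj
    rw [show ((a : Int) + j) = ((a + j : Nat) : Int) by push_cast; ring,
        show (((col.length - k : Nat) : Int) + j) = ((col.length - k + j : Nat) : Int) by push_cast; ring,
        pvGi_nat col (a + j) (by omega), pvGi_nat col (col.length - k + j) (by omega)]
    rw [← hg1 j hj, ← hg2 j hj]
    congr 1
  · intro hpt
    apply List.ext_getElem (by simp [List.length_take, List.length_drop]; omega)
    intro j h1 h2
    have hj : j < k := by simp [List.length_take, List.length_drop] at h1; omega
    rw [hg1 j hj, hg2 j hj]
    have := hpt j hj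
    rwa [show ((a : Int) + j) = ((a + j : Nat) : Int) by push_cast; ring,
        show (((col.length - k : Nat) : Int) + j) = ((col.length - k + j : Nat) : Int) by push_cast; ring,
        pvGi_nat col (a + j) (by omega), pvGi_nat col (col.length - k + j) (by omega)] at this

lemma pvSlice_iff (col : List Int) (k : Nat) (i : Int) (h0 : 0 ≤ i)
    (hik : i + k ≤ (col.length : Int)) (hk : (k : Int) ≤ (col.length : Int)) :
    (PySem.List.slice col (some i) (some (i + k))
      = PySem.List.slice col (some ((col.length : Int) - k)) none)
    ↔ (∀ j : Nat, j < k →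
        PySem.List.pyGetD col (i + j) 0
          = PySem.List.pyGetD col (((col.length : Int) - k) + j) 0) := by
  obtain ⟨a, rfl⟩ : ∃ a : Nat, i = (a : Int) := ⟨i.toNat, (Int.toNat_of_nonneg h0).symm⟩
  have hak : a + k ≤ col.length := by omega
  have hkk : k ≤ col.length := by omega
  rw [PySem.List.slice_natCast_add,
      show ((col.length : Int) - k) = ((col.length - k : Nat) : Int) by
        push_cast [Nat.cast_sub hkk]; ring,
      PySem.List.slice_from_natCast]
  rw [pvSeg_eq_iff col a k hak]

lemma pvHkey1 (col : List Int) :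
    ∀ i ∈ PySem.List.pyRange 0 ((col.length : Int) - (1:Nat)) 1,
      ((PySem.List.pyGetD col i 0) == (PySem.List.pyGetD col ((col.length : Int) - (1:Nat)) 0))
      = decide (PySem.List.slice col (some i) (some (i + (1:Nat)))
          = PySem.List.slice col (some ((col.length : Int) - (1:Nat))) none) := by
  intro i hi
  rw [PySem.List.mem_pyRange_one] at hi
  rw [Bool.beq_eq_decide_eq, decide_eq_decide]
  rw [pvSlice_iff col 1 i hi.1 (by push_cast at hi ⊢; omega) (by push_cast at hi ⊢; omega)]
  constructor
  · intro H j hj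
    interval_cases j
    simpa using H
  · intro H
    simpa using H 0 (by omega)

lemma pvHkey2 (col : List Int) :
    ∀ i ∈ PySem.List.pyRange 0 ((col.length : Int) - (2:Nat)) 1,
      (((PySem.List.pyGetD col i 0, PySem.List.pyGetD col (i + 1) 0) : Int × Int)
        == (PySem.List.pyGetD col ((col.length : Int) - (2:Nat)) 0,
            PySem.List.pyGetD col ((col.length : Int) - (2:Nat) + 1) 0))
      = decide (PySem.List.slice col (some i) (some (i + (2:Nat)))
          = PySem.List.slice col (some ((col.length : Int) - (2:Nat))) none) := by
  intro i hi
  rw [PySem.List.mem_pyRange_one] at hi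
  rw [Bool.beq_eq_decide_eq, decide_eq_decide]
  rw [pvSlice_iff col 2 i hi.1 (by push_cast at hi ⊢; omega) (by push_cast at hi ⊢; omega)]
  simp only [Prod.mk.injEq]
  constructor
  · rintro ⟨H0, H1⟩ j hj
    interval_cases j
    · simpa using H0
    · simpa using H1
  · intro H
    exact ⟨by simpa using H 0 (by omega), by simpa using H 1 (by omega)⟩

lemma pvHkey3 (col : List Int) :
    ∀ i ∈ PySem.List.pyRange 0 ((col.length : Int) - (3:Nat)) 1,
      (((PySem.List.pyGetD col i 0, PySem.List.pyGetD col (i + 1) 0,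
         PySem.List.pyGetD col (i + 2) 0) : Int × Int × Int)
        == (PySem.List.pyGetD col ((col.length : Int) - (3:Nat)) 0,
            PySem.List.pyGetD col ((col.length : Int) - (3:Nat) + 1) 0,
            PySem.List.pyGetD col ((col.length : Int) - (3:Nat) + 2) 0))
      = decide (PySem.List.slice col (some i) (some (i + (3:Nat)))
          = PySem.List.slice col (some ((col.length : Int) - (3:Nat))) none) := by
  intro i hi
  rw [PySem.List.mem_pyRange_one] at hi
  rw [Bool.beq_eq_decide_eq, decide_eq_decide]
  rw [pvSlice_iff col 3 i hi.1 (by push_cast at hi ⊢; omega) (by push_cast at hi ⊢; omega)]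
  simp only [Prod.mk.injEq]
  constructor
  · rintro ⟨H0, H1, H2⟩ j hj
    interval_cases j
    · simpa using H0
    · simpa using H1
    · simpa using H2
  · intro H
    exact ⟨by simpa using H 0 (by omega), by simpa using H 1 (by omega),
           by simpa using H 2 (by omega)⟩

lemma pvHkey4 (col : List Int) :
    ∀ i ∈ PySem.List.pyRange 0 ((col.length : Int) - (4:Nat)) 1,
      (((PySem.List.pyGetD col i 0, PySem.List.pyGetD col (i + 1) 0,
         PySem.List.pyGetD col (i + 2) 0, PySem.List.pyGetD col (i + 3) 0) : Int × Int × Int × Int)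
        == (PySem.List.pyGetD col ((col.length : Int) - (4:Nat)) 0,
            PySem.List.pyGetD col ((col.length : Int) - (4:Nat) + 1) 0,
            PySem.List.pyGetD col ((col.length : Int) - (4:Nat) + 2) 0,
            PySem.List.pyGetD col ((col.length : Int) - (4:Nat) + 3) 0))
      = decide (PySem.List.slice col (some i) (some (i + (4:Nat)))
          = PySem.List.slice col (some ((col.length : Int) - (4:Nat))) none) := by
  intro i hi
  rw [PySem.List.mem_pyRange_one] at hi
  rw [Bool.beq_eq_decide_eq, decide_eq_decide]
  rw [pvSlice_iff col 4 i hi.1 (by push_cast at hi ⊢; omega) (by push_cast at hi ⊢; omega)]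
  simp only [Prod.mk.injEq]
  constructor
  · rintro ⟨H0, H1, H2, H3⟩ j hj
    interval_cases j
    · simpa using H0
    · simpa using H1
    · simpa using H2
    · simpa using H3
  · intro H
    exact ⟨by simpa using H 0 (by omega), by simpa using H 1 (by omega),
           by simpa using H 2 (by omega), by simpa using H 3 (by omega)⟩

lemma pvHkey5 (col : List Int) :
    ∀ i ∈ PySem.List.pyRange 0 ((col.length : Int) - (5:Nat)) 1,
      (((PySem.List.pyGetD col i 0, PySem.List.pyGetD col (i + 1) 0,
         PySem.List.pyGetD col (i + 2) 0, PySem.List.pyGetD col (i + 3) 0,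
         PySem.List.pyGetD col (i + 4) 0) : Int × Int × Int × Int × Int)
        == (PySem.List.pyGetD col ((col.length : Int) - (5:Nat)) 0,
            PySem.List.pyGetD col ((col.length : Int) - (5:Nat) + 1) 0,
            PySem.List.pyGetD col ((col.length : Int) - (5:Nat) + 2) 0,
            PySem.List.pyGetD col ((col.length : Int) - (5:Nat) + 3) 0,
            PySem.List.pyGetD col ((col.length : Int) - (5:Nat) + 4) 0))
      = decide (PySem.List.slice col (some i) (some (i + (5:Nat)))
          = PySem.List.slice col (some ((col.length : Int) - (5:Nat))) none) := by
  intro i hi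
  rw [PySem.List.mem_pyRange_one] at hi
  rw [Bool.beq_eq_decide_eq, decide_eq_decide]
  rw [pvSlice_iff col 5 i hi.1 (by push_cast at hi ⊢; omega) (by push_cast at hi ⊢; omega)]
  simp only [Prod.mk.injEq]
  constructor
  · rintro ⟨H0, H1, H2, H3, H4⟩ j hj
    interval_cases j
    · simpa using H0
    · simpa using H1
    · simpa using H2
    · simpa using H3
    · simpa using H4
  · intro H
    exact ⟨by simpa using H 0 (by omega), by simpa using H 1 (by omega),
           by simpa using H 2 (by omega), by simpa using H 3 (by omega),
           by simpa using H 4 (by omega)⟩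

lemma pvGo_zero (col : List Int) : pvGo col 0 = PySem.List.pyGetD col (-1) 0 := rfl

lemma pvGo_one (col : List Int) :
    pvGo col 1 = if (2:Int) ≤ (col.length : Int) then
      (if (pvLevelCounts col 1).items.isEmpty then pvGo col 0
       else pvMostCommon1 (pvLevelCounts col 1)) else pvGo col 0 := rfl

lemma pvGo_two (col : List Int) :
    pvGo col 2 = if (3:Int) ≤ (col.length : Int) then
      (if (pvLevelCounts col 2).items.isEmpty then pvGo col 1
       else pvMostCommon1 (pvLevelCounts col 2)) else pvGo col 1 := rfl

lemma pvGo_three (col : List Int) :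
    pvGo col 3 = if (4:Int) ≤ (col.length : Int) then
      (if (pvLevelCounts col 3).items.isEmpty then pvGo col 2
       else pvMostCommon1 (pvLevelCounts col 3)) else pvGo col 2 := rfl

lemma pvGo_four (col : List Int) :
    pvGo col 4 = if (5:Int) ≤ (col.length : Int) then
      (if (pvLevelCounts col 4).items.isEmpty then pvGo col 3
       else pvMostCommon1 (pvLevelCounts col 4)) else pvGo col 3 := rfl

lemma pvGo_five (col : List Int) :
    pvGo col 5 = if (6:Int) ≤ (col.length : Int) then
      (if (pvLevelCounts col 5).items.isEmpty then pvGo col 4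
       else pvMostCommon1 (pvLevelCounts col 5)) else pvGo col 4 := rfl

-- a two-row column: the level-1 pass returns the last value whether or not the two rows agree,
-- matching m_bigram's direct return of h[-1][pos] (m_transition is not reached for len(h) = 2)
lemma pvBase2 (col : List Int) (h2 : col.length = 2) :
    pvGo col 1 = PySem.List.pyGetD col (-1) 0 := by
  obtain ⟨x, y, rfl⟩ := List.length_eq_two.mp h2
  rw [pvGo_one, pvGo_zero]
  rw [if_pos (show (2:Int) ≤ (([x, y] : List Int).length : Int) by norm_num)]
  unfold pvLevelCounts
  simp only []
  rw [show ((([x, y] : List Int).length : Int) - (1:Nat)) = 1 by norm_num,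
      show PySem.List.pyRange 0 1 1 = [(0:Int)] from rfl]
  simp only [List.foldl_cons, List.foldl_nil]
  rw [show PySem.List.slice [x, y] (some 0) (some (0 + (1:Nat))) = [x] from rfl,
      show PySem.List.slice [x, y] (some 1) none = [y] from rfl]
  by_cases hxy : x = y
  · subst hxy
    rw [if_pos rfl]
    rfl
  · rw [if_neg (show ¬([x] = [y]) by simp [hxy])]
    rfl

lemma pvTrans_eq (h : List (List Int)) (pos : Int) :
    m_transition h pos = pvGo (pvColumn h pos) 1 := by
  unfold m_transition
  simp only [pvCell_eq, PySem.List.len_eq, ← pvColumn_length h pos]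
  set col := pvColumn h pos with hcol
  rw [pvGo_one, pvGo_zero]
  by_cases hlen : (2:Int) ≤ (col.length : Int)
  · rw [if_pos hlen]
    rw [show (-1:Int) = -((1:Nat):Int) by norm_num]
    rw [pvGi_neg col 1 (by norm_num) (by omega)]
    exact pvLevel_eq col 1 (fun i => PySem.List.pyGetD col i 0)
      (PySem.List.pyGetD col ((col.length : Int) - (1:Nat)) 0) (pvHkey1 col)
  · rw [if_neg hlen, PySem.List.pyRange_one_eq_nil (by omega)]
    simp

lemma pvBigram_eq (h : List (List Int)) (pos : Int) :
    m_bigram h pos = pvGo (pvColumn h pos) 2 := by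
  unfold m_bigram
  simp only [pvCell_eq, PySem.List.len_eq, ← pvColumn_length h pos]
  set col := pvColumn h pos with hcol
  rw [pvGo_two]
  by_cases hlen : (col.length : Int) < 3
  · rw [if_pos hlen, if_neg (show ¬((3:Int) ≤ (col.length : Int)) by omega)]
    by_cases h2 : col.length = 2
    · rw [pvBase2 col h2]
    · rw [pvGo_one, if_neg (show ¬((2:Int) ≤ (col.length : Int)) by omega), pvGo_zero]
  · rw [if_neg hlen, if_pos (show (3:Int) ≤ (col.length : Int) by omega)]
    rw [pvTrans_eq h pos, ← hcol]
    rw [show (-2:Int) = -((2:Nat):Int) by norm_num,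
        show (-1:Int) = -((1:Nat):Int) by norm_num]
    rw [pvGi_neg col 2 (by norm_num) (by omega), pvGi_neg col 1 (by norm_num) (by omega)]
    rw [pvGi_congr col (show (col.length : Int) - ((1:Nat):Int)
          = (col.length : Int) - ((2:Nat):Int) + 1 by push_cast; ring)]
    exact pvLevel_eq col 2
      (fun i => (PySem.List.pyGetD col i 0, PySem.List.pyGetD col (i + 1) 0))
      (pvGo col 1) (pvHkey2 col)

lemma pvTrigram_eq (h : List (List Int)) (pos : Int) :
    m_trigram h pos = pvGo (pvColumn h pos) 3 := by
  unfold m_trigram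
  simp only [pvCell_eq, PySem.List.len_eq, ← pvColumn_length h pos]
  set col := pvColumn h pos with hcol
  rw [pvGo_three]
  by_cases hlen : (col.length : Int) < 4
  · rw [if_pos hlen, if_neg (show ¬((4:Int) ≤ (col.length : Int)) by omega)]
    rw [pvBigram_eq h pos, ← hcol]
  · rw [if_neg hlen, if_pos (show (4:Int) ≤ (col.length : Int) by omega)]
    rw [pvBigram_eq h pos, ← hcol]
    rw [show (-3:Int) = -((3:Nat):Int) by norm_num,
        show (-2:Int) = -((2:Nat):Int) by norm_num,
        show (-1:Int) = -((1:Nat):Int) by norm_num]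
    rw [pvGi_neg col 3 (by norm_num) (by omega), pvGi_neg col 2 (by norm_num) (by omega),
        pvGi_neg col 1 (by norm_num) (by omega)]
    rw [pvGi_congr col (show (col.length : Int) - ((2:Nat):Int)
          = (col.length : Int) - ((3:Nat):Int) + 1 by push_cast; ring),
        pvGi_congr col (show (col.length : Int) - ((1:Nat):Int)
          = (col.length : Int) - ((3:Nat):Int) + 2 by push_cast; ring)]
    exact pvLevel_eq col 3
      (fun i => (PySem.List.pyGetD col i 0, PySem.List.pyGetD col (i + 1) 0,
                 PySem.List.pyGetD col (i + 2) 0))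
      (pvGo col 2) (pvHkey3 col)

lemma pv4gram_eq (h : List (List Int)) (pos : Int) :
    m_4gram h pos = pvGo (pvColumn h pos) 4 := by
  unfold m_4gram
  simp only [pvCell_eq, PySem.List.len_eq, ← pvColumn_length h pos]
  set col := pvColumn h pos with hcol
  rw [pvGo_four]
  by_cases hlen : (col.length : Int) < 5
  · rw [if_pos hlen, if_neg (show ¬((5:Int) ≤ (col.length : Int)) by omega)]
    rw [pvTrigram_eq h pos, ← hcol]
  · rw [if_neg hlen, if_pos (show (5:Int) ≤ (col.length : Int) by omega)]
    rw [pvTrigram_eq h pos, ← hcol]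
    rw [show (-4:Int) = -((4:Nat):Int) by norm_num,
        show (-3:Int) = -((3:Nat):Int) by norm_num,
        show (-2:Int) = -((2:Nat):Int) by norm_num,
        show (-1:Int) = -((1:Nat):Int) by norm_num]
    rw [pvGi_neg col 4 (by norm_num) (by omega), pvGi_neg col 3 (by norm_num) (by omega),
        pvGi_neg col 2 (by norm_num) (by omega), pvGi_neg col 1 (by norm_num) (by omega)]
    rw [pvGi_congr col (show (col.length : Int) - ((3:Nat):Int)
          = (col.length : Int) - ((4:Nat):Int) + 1 by push_cast; ring),
        pvGi_congr col (show (col.length : Int) - ((2:Nat):Int)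
          = (col.length : Int) - ((4:Nat):Int) + 2 by push_cast; ring),
        pvGi_congr col (show (col.length : Int) - ((1:Nat):Int)
          = (col.length : Int) - ((4:Nat):Int) + 3 by push_cast; ring)]
    exact pvLevel_eq col 4
      (fun i => (PySem.List.pyGetD col i 0, PySem.List.pyGetD col (i + 1) 0,
                 PySem.List.pyGetD col (i + 2) 0, PySem.List.pyGetD col (i + 3) 0))
      (pvGo col 3) (pvHkey4 col)

lemma pv5gram_eq (h : List (List Int)) (pos : Int) :
    m_5gram h pos = pvGo (pvColumn h pos) 5 := by
  unfold m_5gram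
  simp only [pvCell_eq, PySem.List.len_eq, ← pvColumn_length h pos]
  set col := pvColumn h pos with hcol
  rw [pvGo_five]
  by_cases hlen : (col.length : Int) < 6
  · rw [if_pos hlen, if_neg (show ¬((6:Int) ≤ (col.length : Int)) by omega)]
    rw [pv4gram_eq h pos, ← hcol]
  · rw [if_neg hlen, if_pos (show (6:Int) ≤ (col.length : Int) by omega)]
    rw [pv4gram_eq h pos, ← hcol]
    rw [pvGi_congr col (show (col.length : Int) - 5
          = (col.length : Int) - ((5:Nat):Int) by push_cast; ring),
        pvGi_congr col (show (col.length : Int) - 4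
          = (col.length : Int) - ((5:Nat):Int) + 1 by push_cast; ring),
        pvGi_congr col (show (col.length : Int) - 3
          = (col.length : Int) - ((5:Nat):Int) + 2 by push_cast; ring),
        pvGi_congr col (show (col.length : Int) - 2
          = (col.length : Int) - ((5:Nat):Int) + 3 by push_cast; ring),
        pvGi_congr col (show (col.length : Int) - 1
          = (col.length : Int) - ((5:Nat):Int) + 4 by push_cast; ring)]
    exact pvLevel_eq col 5
      (fun i => (PySem.List.pyGetD col i 0, PySem.List.pyGetD col (i + 1) 0,
                 PySem.List.pyGetD col (i + 2) 0, PySem.List.pyGetD col (i + 3) 0,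
                 PySem.List.pyGetD col (i + 4) 0))
      (pvGo col 4) (pvHkey5 col)

-- ===== VERDICT (by name: the statement is the Claim_ definition above) =====
theorem m_5gram_spec : Claim_equal_m_5gram := by
  intro h_ pos _ _
  unfold Spec_m_5gram m_5gram_alt
  exact pv5gram_eq h_ pos
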